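-- pv_equiv track=rewrite | github.com/andriiglukhyi/codewars | createfourletter/solution.py | bird_code
-- ===== SOURCE A (Python) =====
-- def bird_code(arr):
--     new = []
--     for item in arr:
--         if '-'in item:
--             item = item.replace('-', ' ')
--         temp = item.split(' ')
--         if len (temp) == 1:
--             new.append(temp[0][:4].upper())
--         if len(temp) == 2:
--             new.append(temp[0][:2].upper() + temp[1][:2].upper())
--         if len(temp) == 3:
--             new.append(temp[0][0].upper() + temp[1][0].upper() + temp[2][:2].upper())
--         if len(temp) == 4:
--             new.append(temp[0][0].upper() + temp[1][0].upper() + temp[2][0].upper() + temp[3][0].upper())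
--     return new
-- ===== SOURCE B (Python) =====
-- def bird_code(arr):
--     def code(words):
--         # distribute the 4 letters arithmetically: 4//L from each word, the
--         # remainder 4%L going to the last word
--         k, r = divmod(4, len(words))
--         return ''.join(w.upper()[:k] for w in words[:-1]) + words[-1].upper()[:k + r]
--     split_all = [item.replace('-', ' ').split(' ') for item in arr]
--     return [code(ws) for ws in split_all if 1 <= len(ws) <= 4]
-- ===== Notes on version B (the rewrite author's own statement) =====
-- stated objective: alternative
-- what changed: Replaces the four explicit per-length branches by an arithmetic rule — divmod(4, L) gives each word's prefix length, the remainder going to the last word — applied in two staged passes (split all items, then filter 1<=L<=4 and build codes), uppercasing whole words before slicing instead of each slice after.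
import Mathlib
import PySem

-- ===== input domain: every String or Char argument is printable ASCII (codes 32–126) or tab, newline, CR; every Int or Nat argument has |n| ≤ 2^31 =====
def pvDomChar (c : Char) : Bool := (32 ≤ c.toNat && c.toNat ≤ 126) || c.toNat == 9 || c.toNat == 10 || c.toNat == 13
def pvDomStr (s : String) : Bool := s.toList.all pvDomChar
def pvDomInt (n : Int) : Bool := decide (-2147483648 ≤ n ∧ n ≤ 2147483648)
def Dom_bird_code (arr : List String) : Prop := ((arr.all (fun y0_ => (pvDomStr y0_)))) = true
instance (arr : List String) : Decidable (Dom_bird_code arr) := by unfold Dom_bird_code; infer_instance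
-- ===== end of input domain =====

-- B derives each word's prefix length arithmetically via divmod(4, word count) instead of A's
-- four explicit branches, in two staged passes (split everything, then filter and build) (objective: alternative).

-- ===== PORT A =====
-- temp[i][0] in Python: a one-character string; IndexError (none) only on inputs Pre_ excludes.
def pvCh0 (w : String) : String :=
  match PySem.Str.pyGet? w 0 with
  | some c => String.singleton c
  | none => ""

def pvStepA (new : List String) (item : String) : List String :=
  let item := if PySem.Str.isIn "-" item then PySem.Str.replace item "-" " " else item
  let temp := (PySem.Str.split? item " ").getD []
  let t : Nat → String := fun i => (PySem.List.pyGet? temp (i : Int)).getD ""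
  let new := if temp.length = 1 then
      new ++ [PySem.Str.upper (PySem.Str.slice (t 0) none (some 4))] else new
  let new := if temp.length = 2 then
      new ++ [PySem.Str.upper (PySem.Str.slice (t 0) none (some 2)) ++
              PySem.Str.upper (PySem.Str.slice (t 1) none (some 2))] else new
  let new := if temp.length = 3 then
      new ++ [PySem.Str.upper (pvCh0 (t 0)) ++ PySem.Str.upper (pvCh0 (t 1)) ++
              PySem.Str.upper (PySem.Str.slice (t 2) none (some 2))] else new
  let new := if temp.length = 4 then
      new ++ [PySem.Str.upper (pvCh0 (t 0)) ++ PySem.Str.upper (pvCh0 (t 1)) ++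
              PySem.Str.upper (pvCh0 (t 2)) ++ PySem.Str.upper (pvCh0 (t 3))] else new
  new

def bird_code (arr : List String) : List String :=
  arr.foldl pvStepA []

-- ===== PORT B =====
-- item.replace('-', ' ').split(' ')
def pvWordsOf (item : String) : List String :=
  (PySem.Str.split? (PySem.Str.replace item "-" " ") " ").getD []

-- code(words): k, r = divmod(4, len(words)); ''.join(w.upper()[:k] for w in words[:-1]) + words[-1].upper()[:k+r]
def pvCodeB (ws : List String) : String :=
  let k : Int := PySem.Int.floordiv 4 (ws.length : Int)
  let r : Int := PySem.Int.mod 4 (ws.length : Int)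
  PySem.Str.join ""
      ((PySem.List.slice ws none (some (-1))).map
        (fun w => PySem.Str.slice (PySem.Str.upper w) none (some k)))
    ++ PySem.Str.slice (PySem.Str.upper ((PySem.List.pyGet? ws (-1)).getD "")) none (some (k + r))

def bird_code_alt (arr : List String) : List String :=
  ((arr.map pvWordsOf).filter
      (fun ws => decide (1 ≤ ws.length) && decide (ws.length ≤ 4))).map pvCodeB

-- ===== PRECONDITION & SPEC =====
-- Pre_ excludes exactly the inputs on which A raises IndexError: an item splitting into 3 words
-- whose 1st or 2nd word is empty, or into 4 words one of which is empty (Python indexes word[0] there).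
def Pre_bird_code (arr : List String) : Prop :=
  ∀ item ∈ arr,
    ((pvWordsOf item).length = 3 → (pvWordsOf item).headD "" ≠ "" ∧ ((pvWordsOf item).tail).headD "" ≠ "") ∧
    ((pvWordsOf item).length = 4 → "" ∉ pvWordsOf item)
instance (arr : List String) : Decidable (Pre_bird_code arr) := by unfold Pre_bird_code; infer_instance

def pvWitness_bird_code : List String := ["black-capped chickadee", "goose", "common loon"]

def Spec_bird_code (arr : List String) (out : List String) : Prop := out = bird_code_alt arr
instance (arr : List String) (out : List String) : Decidable (Spec_bird_code arr out) := by unfold Spec_bird_code; infer_instance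

-- ===== CLAIM (what is proved, stated in full; the proofs are below) =====
def Claim_equal_bird_code : Prop := ∀ (arr : List String), Dom_bird_code arr → Pre_bird_code arr → Spec_bird_code arr (bird_code arr)

-- ===== LEMMAS AND PROOFS =====

-- replace is the identity when the pattern does not occur
theorem pv_replace_go_of_not_infix (old new : List Char) :
    ∀ (s : List Char) (fuel : Nat) (acc : List Char), ¬ old <:+: s →
      PySem.Chars.replace.go old new fuel s acc = acc.reverse ++ s := by
  intro s
  induction s with
  | nil => intro fuel acc _; cases fuel <;> simp [PySem.Chars.replace.go]
  | cons c t ih =>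
    intro fuel acc h
    cases fuel with
    | zero => simp [PySem.Chars.replace.go]
    | succ n =>
      have hpre : old.isPrefixOf (c :: t) = false := by
        rcases Bool.eq_false_or_eq_true (old.isPrefixOf (c :: t)) with hb | hb
        · exact absurd ((List.isPrefixOf_iff_prefix.mp hb).isInfix) h
        · exact hb
      have ht : ¬ old <:+: t := fun hi => by
        obtain ⟨u, v, huv⟩ := hi
        exact h ⟨c :: u, v, by simp [← huv]⟩
      simp [PySem.Chars.replace.go, hpre, ih n (c :: acc) ht]

theorem pv_replace_of_not_isIn (s : String) (h : PySem.Str.isIn "-" s = false) :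
    PySem.Str.replace s "-" " " = s := by
  apply String.toList_inj.mp
  rw [PySem.Str.toList_replace]
  have hni : ¬ ("-".toList) <:+: s.toList := by
    have := PySem.Chars.isIn_eq_false_iff "-".toList s.toList
    rw [← PySem.Str.isIn_eq] at this
    exact this.mp h
  have hold : ("-".toList) ≠ [] := by decide
  rw [PySem.Chars.replace]
  simp only [List.isEmpty_iff]
  rw [if_neg hold]
  simpa using pv_replace_go_of_not_infix _ _ s.toList s.toList.length [] hni

-- so A's conditionally-replaced item always splits into pvWordsOf item
theorem pv_tempA_eq (item : String) :
    ((PySem.Str.split? (if PySem.Str.isIn "-" item then PySem.Str.replace item "-" " " else item) " ").getD [])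
      = pvWordsOf item := by
  unfold pvWordsOf
  rcases Bool.eq_false_or_eq_true (PySem.Str.isIn "-" item) with hb | hb
  · simp only [hb]
    rw [if_pos trivial]
  · simp only [hb]
    rw [if_neg (by simp), pv_replace_of_not_isIn item hb]

theorem pv_ch0_eq_slice (w : String) (h : w ≠ "") :
    pvCh0 w = PySem.Str.slice w none (some 1) := by
  have hl : w.toList ≠ [] := fun hn => h (String.toList_inj.mp (by simpa using hn))
  rcases List.exists_cons_of_ne_nil hl with ⟨c, r, hc⟩
  apply String.toList_inj.mp
  unfold pvCh0
  have hg : PySem.Str.pyGet? w 0 = some c := by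
    simp [hc]
  rw [hg]
  have : (PySem.Str.slice w none (some 1)).toList = w.toList.take 1 := by
    simp [PySem.Str.toList_slice, PySem.Chars.slice_eq_listSlice]
    rw [show ((1 : Int)) = ((1 : Nat) : Int) by simp, PySem.List.slice_to_natCast]
  rw [this, hc]
  simp

-- upper of a whole word then a nonnegative prefix = upper of the prefix (uppercasing is per-character)
theorem pv_upper_slice (cs : List Char) (k : Int) (hk : 0 ≤ k) :
    PySem.List.slice (PySem.Chars.upper cs) none (some k) =
      PySem.Chars.upper (PySem.List.slice cs none (some k)) := by
  obtain ⟨n, rfl⟩ := Int.eq_ofNat_of_zero_le hk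
  simp [PySem.List.slice_to_natCast, PySem.Chars.upper, List.map_take]

-- ''.join with empty separator is concatenation
theorem pv_flatten_intersperse_nil (l : List (List Char)) :
    (List.intersperse ([] : List Char) l).flatten = l.flatten := by
  induction l with
  | nil => rfl
  | cons x t ih =>
    cases t with
    | nil => rfl
    | cons y u => simp_all [List.intersperse_cons₂]

theorem pv_intercalate_nil (l : List (List Char)) :
    List.intercalate [] l = l.flatten := by
  rw [List.intercalate, pv_flatten_intersperse_nil]

-- each A step appends its item's contribution to the accumulator
theorem pv_stepA_append (new : List String) (item : String) :
    pvStepA new item = new ++ pvStepA [] item := by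
  unfold pvStepA
  dsimp only
  generalize (PySem.Str.split? (if PySem.Str.isIn "-" item then PySem.Str.replace item "-" " " else item) " ").getD [] = T
  split_ifs <;> simp

theorem pv_foldl_emit (f : List String → String → List String)
    (hf : ∀ acc x, f acc x = acc ++ f [] x) :
    ∀ (arr : List String) (acc : List String), arr.foldl f acc = acc ++ arr.flatMap (f []) := by
  intro arr
  induction arr with
  | nil => simp
  | cons a l ih => intro acc; rw [List.foldl_cons, hf acc a, List.flatMap_cons, ih, List.append_assoc]

-- B's map-filter-map pipeline as a flatMap
theorem pv_B_flatMap (arr : List String) :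
    bird_code_alt arr =
      arr.flatMap (fun item =>
        if 1 ≤ (pvWordsOf item).length ∧ (pvWordsOf item).length ≤ 4
        then [pvCodeB (pvWordsOf item)] else []) := by
  unfold bird_code_alt
  induction arr with
  | nil => rfl
  | cons a l ih =>
    simp only [List.map_cons, List.filter_cons, List.flatMap_cons, ← ih]
    by_cases h : 1 ≤ (pvWordsOf a).length ∧ (pvWordsOf a).length ≤ 4
    · simp [h.1, h.2]
    · rw [if_neg h]
      have : (decide (1 ≤ (pvWordsOf a).length) && decide ((pvWordsOf a).length ≤ 4)) = false := by
        simpa [Decidable.not_and_iff_not_or_not] using h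
      simp [this]

-- the per-item contributions agree wherever A does not raise
theorem pv_step_eq (item : String)
    (h3 : (pvWordsOf item).length = 3 → (pvWordsOf item).headD "" ≠ "" ∧ ((pvWordsOf item).tail).headD "" ≠ "")
    (h4 : (pvWordsOf item).length = 4 → "" ∉ pvWordsOf item) :
    pvStepA [] item =
      (if 1 ≤ (pvWordsOf item).length ∧ (pvWordsOf item).length ≤ 4
       then [pvCodeB (pvWordsOf item)] else []) := by
  unfold pvStepA
  dsimp only
  rw [pv_tempA_eq item]
  match hws : pvWordsOf item with
  | [] => simp
  | [a] =>
      simp [pvCodeB, PySem.List.pyGet?, PySem.List.pyIdx?, PySem.Int.floordiv, PySem.Int.mod,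
            PySem.List.slice_to_neg_one]
      apply String.toList_inj.mp
      simp [PySem.Str.toList_join, PySem.Chars.join, pv_intercalate_nil,
            pv_upper_slice a.toList 4 (by norm_num)]
  | [a, b] =>
      simp [pvCodeB, PySem.List.pyGet?, PySem.List.pyIdx?, PySem.Int.floordiv, PySem.Int.mod,
            PySem.List.slice_to_neg_one]
      apply String.toList_inj.mp
      simp [PySem.Str.toList_join, PySem.Chars.join, pv_intercalate_nil,
            pv_upper_slice a.toList 2 (by norm_num), pv_upper_slice b.toList 2 (by norm_num)]
  | [a, b, c] =>
      rw [hws] at h3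
      obtain ⟨ha, hb⟩ := h3 rfl
      simp only [List.headD, List.tail] at ha hb
      simp [pvCodeB, PySem.List.pyGet?, PySem.List.pyIdx?, PySem.Int.floordiv, PySem.Int.mod,
            pv_ch0_eq_slice a ha, pv_ch0_eq_slice b hb,
            PySem.List.slice_to_neg_one]
      apply String.toList_inj.mp
      simp [PySem.Str.toList_join, PySem.Chars.join, pv_intercalate_nil,
            pv_upper_slice a.toList 1 (by norm_num), pv_upper_slice b.toList 1 (by norm_num),
            pv_upper_slice c.toList 2 (by norm_num)]
  | [a, b, c, d] =>
      rw [hws] at h4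
      have hmem := h4 rfl
      have ha : a ≠ "" := fun h => hmem (by simp [h])
      have hb : b ≠ "" := fun h => hmem (by simp [h])
      have hc : c ≠ "" := fun h => hmem (by simp [h])
      have hd : d ≠ "" := fun h => hmem (by simp [h])
      simp [pvCodeB, PySem.List.pyGet?, PySem.List.pyIdx?, PySem.Int.floordiv, PySem.Int.mod,
            pv_ch0_eq_slice a ha, pv_ch0_eq_slice b hb, pv_ch0_eq_slice c hc, pv_ch0_eq_slice d hd,
            PySem.List.slice_to_neg_one]
      apply String.toList_inj.mp
      simp [PySem.Str.toList_join, PySem.Chars.join, pv_intercalate_nil,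
            pv_upper_slice a.toList 1 (by norm_num), pv_upper_slice b.toList 1 (by norm_num),
            pv_upper_slice c.toList 1 (by norm_num), pv_upper_slice d.toList 1 (by norm_num)]
  | a :: b :: c :: d :: e :: rest =>
      simp only [List.length_cons]
      have hno : ¬ (1 ≤ rest.length + 1 + 1 + 1 + 1 + 1 ∧ rest.length + 1 + 1 + 1 + 1 + 1 ≤ 4) := by omega
      rw [if_neg hno]
      split_ifs <;> first | rfl | omega

-- ===== VERDICT (by name: the statement is the Claim_ definition above) =====
theorem bird_code_spec : Claim_equal_bird_code := by
  intro arr _ hpre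
  unfold Spec_bird_code bird_code
  rw [pv_foldl_emit pvStepA pv_stepA_append, pv_B_flatMap]
  simp only [List.nil_append]
  apply List.flatMap_congr
  intro x hx
  exact pv_step_eq x (hpre x hx).1 (hpre x hx).2
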